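-- pv_equiv track=rewrite | github.com/3xt3r/oss_checks | license/collect_licenses.py | find_all_paths_to_target
-- ===== SOURCE A (Python) =====
-- from typing import Dict, Iterable, List, Optional, Tuple
--
-- def find_all_paths_to_target(
--     target_ref: str,
--     parents: Dict[str, List[str]],
--     roots: List[str],
--     label_map: Dict[str, str],
--     max_depth: int,
--     max_paths: int,
-- ) -> Tuple[List[str], bool]:
--     roots_set = set(roots)
--     truncated = False
--     results: List[List[str]] = []
--
--     stack: List[Tuple[str, List[str], set]] = [(target_ref, [target_ref], {target_ref})]
--
--     while stack:
--         node, path_rev, seen = stack.pop()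
--         if len(results) >= max_paths:
--             truncated = True
--             break
--         if len(path_rev) > max_depth:
--             continue
--
--         if node in roots_set:
--             results.append(list(reversed(path_rev)))
--             continue
--
--         for p in parents.get(node, []):
--             if p in seen:
--                 continue
--             stack.append((p, path_rev + [p], seen | {p}))
--
--     out: List[str] = []
--     seen_s = set()
--     for p in results:
--         s = " -> ".join(label_map.get(x, x) for x in p)
--         if s not in seen_s:
--             seen_s.add(s)
--             out.append(s)
--
--     return out, truncated
-- ===== SOURCE B (Python) =====
-- from typing import Dict, List, Tuple
--
-- def find_all_paths_to_target(
--     target_ref: str,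
--     parents: Dict[str, List[str]],
--     roots: List[str],
--     label_map: Dict[str, str],
--     max_depth: int,
--     max_paths: int,
-- ) -> Tuple[List[str], bool]:
--     roots_set = set(roots)
--     results: List[List[str]] = []
--     state = {"truncated": False}
--
--     def dfs(node: str, path_rev: List[str], seen: set) -> None:
--         if state["truncated"]:
--             return
--         if len(results) >= max_paths:
--             state["truncated"] = True
--             return
--         if len(path_rev) > max_depth:
--             return
--         if node in roots_set:
--             results.append(list(reversed(path_rev)))
--             return
--         # reversed: visit parents in the same order as a LIFO-stack DFS would
--         for p in reversed(parents.get(node, [])):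
--             if p not in seen:
--                 dfs(p, path_rev + [p], seen | {p})
--
--     dfs(target_ref, [target_ref], {target_ref})
--
--     out = list(dict.fromkeys(
--         " -> ".join(label_map.get(x, x) for x in p) for p in results
--     ))
--     return out, state["truncated"]
-- ===== Notes on version B (the rewrite author's own statement) =====
-- stated objective: alternative
-- what changed: The explicit LIFO stack loop is replaced by a recursive dfs helper (with a truncation flag that aborts pending calls), and the manual out/seen_s dedup loop is replaced by dict.fromkeys; same value everywhere.
import Mathlib
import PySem

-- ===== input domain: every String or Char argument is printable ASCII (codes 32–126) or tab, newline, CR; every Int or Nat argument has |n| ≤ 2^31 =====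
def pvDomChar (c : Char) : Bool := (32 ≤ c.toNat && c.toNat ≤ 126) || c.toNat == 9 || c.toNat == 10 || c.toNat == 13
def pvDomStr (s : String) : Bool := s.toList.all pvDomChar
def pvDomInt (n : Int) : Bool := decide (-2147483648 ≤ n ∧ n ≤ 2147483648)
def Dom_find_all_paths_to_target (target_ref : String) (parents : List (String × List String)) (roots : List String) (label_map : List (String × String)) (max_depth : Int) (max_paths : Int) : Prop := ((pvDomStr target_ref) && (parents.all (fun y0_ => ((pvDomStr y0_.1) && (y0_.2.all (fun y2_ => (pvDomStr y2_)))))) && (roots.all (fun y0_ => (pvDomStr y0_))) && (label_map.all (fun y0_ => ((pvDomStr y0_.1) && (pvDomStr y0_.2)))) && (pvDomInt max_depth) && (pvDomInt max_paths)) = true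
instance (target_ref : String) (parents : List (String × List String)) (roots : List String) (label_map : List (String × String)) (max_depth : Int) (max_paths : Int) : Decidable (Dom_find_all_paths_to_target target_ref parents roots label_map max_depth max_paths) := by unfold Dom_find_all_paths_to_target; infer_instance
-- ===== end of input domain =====

-- B replaces A's explicit LIFO stack by a recursive dfs helper (and A's manual dedup loop
-- by dict.fromkeys); same return value, different decomposition ("alternative").
-- Both Python loops/recursions terminate; the Lean ports carry a Nat fuel threaded linearly
-- through the run as a totality guard only, with a shared bound large enough never to run out.

-- fuel bound, sufficient for the whole search (totality guard, shared by both ports)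
def pvFuelBound (parents : List (String × List String)) : Nat :=
  ((parents.map (fun kv => kv.2.length)).sum + 2) ^ ((parents.map (fun kv => kv.2.length)).sum + 2)

-- ===== PORT A =====
-- the while-stack loop; stack top = head of the list; one fuel unit per pop
def pvLoopA (parents : List (String × List String)) (rootsSet : PySem.Set String)
    (max_depth max_paths : Int) :
    Nat → List (String × List String × PySem.Set String) → List (List String) →
    List (List String) × Bool
  | _, [], results => (results, false)
  | 0, _ :: _, results => (results, false)
  | fuel+1, (node, path_rev, seen) :: rest, results =>
    if (results.length : Int) ≥ max_paths then (results, true)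
    else if (path_rev.length : Int) > max_depth then
      pvLoopA parents rootsSet max_depth max_paths fuel rest results
    else if PySem.Set.contains rootsSet node then
      pvLoopA parents rootsSet max_depth max_paths fuel rest (results ++ [path_rev.reverse])
    else
      -- for p in parents.get(node, []): if p in seen: continue; stack.append(...)
      let pushed := (PySem.Dict.getD (PySem.Dict.mk parents) node []).foldl
        (fun acc p => if PySem.Set.contains seen p then acc
                      else acc ++ [(p, path_rev ++ [p], PySem.Set.add seen p)]) []
      pvLoopA parents rootsSet max_depth max_paths fuel (pushed.reverse ++ rest) results

def find_all_paths_to_target (target_ref : String) (parents : List (String × List String)) (roots : List String) (label_map : List (String × String)) (max_depth : Int) (max_paths : Int) : List String × Bool :=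
  let rootsSet := PySem.Set.ofList roots
  let r := pvLoopA parents rootsSet max_depth max_paths (pvFuelBound parents)
      [(target_ref, [target_ref], PySem.Set.ofList [target_ref])] []
  -- out/seen_s dedup loop
  let d := r.1.foldl
    (fun (acc : List String × PySem.Set String) p =>
      let s := PySem.Str.join " -> " (p.map (fun x => PySem.Dict.getD (PySem.Dict.mk label_map) x x))
      if PySem.Set.contains acc.2 s then acc else (acc.1 ++ [s], PySem.Set.add acc.2 s))
    ([], PySem.Set.empty)
  (d.1, r.2)

-- ===== PORT B =====
-- recursive dfs; the returned Nat is the fuel consumed (guard bookkeeping only)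
def pvDfsB (parents : List (String × List String)) (rootsSet : PySem.Set String)
    (max_depth max_paths : Int) :
    Nat → String → List String → PySem.Set String → (List (List String) × Bool) →
    ((List (List String) × Bool) × Nat)
  | 0, _, _, _, st => (st, 0)
  | fuel+1, node, path_rev, seen, st =>
    if st.2 then (st, 0)
    else if (st.1.length : Int) ≥ max_paths then ((st.1, true), 1)
    else if (path_rev.length : Int) > max_depth then (st, 1)
    else if PySem.Set.contains rootsSet node then ((st.1 ++ [path_rev.reverse], st.2), 1)
    else
      let r := ((PySem.Dict.getD (PySem.Dict.mk parents) node []).reverse).foldl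
        (fun acc p =>
          if PySem.Set.contains seen p then acc
          else
            let q := pvDfsB parents rootsSet max_depth max_paths (fuel - acc.2) p
                (path_rev ++ [p]) (PySem.Set.add seen p) acc.1
            (q.1, acc.2 + q.2))
        (st, 0)
      (r.1, r.2 + 1)
  termination_by fuel => fuel
  decreasing_by exact Nat.lt_succ_of_le (Nat.sub_le _ _)

def find_all_paths_to_target_alt (target_ref : String) (parents : List (String × List String)) (roots : List String) (label_map : List (String × String)) (max_depth : Int) (max_paths : Int) : List String × Bool :=
  let rootsSet := PySem.Set.ofList roots
  let q := pvDfsB parents rootsSet max_depth max_paths (pvFuelBound parents)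
      target_ref [target_ref] (PySem.Set.ofList [target_ref]) ([], false)
  let strs := q.1.1.map (fun p => PySem.Str.join " -> " (p.map (fun x => PySem.Dict.getD (PySem.Dict.mk label_map) x x)))
  (PySem.List.dedup strs, q.1.2)

-- ===== PRECONDITION & SPEC =====
def Spec_find_all_paths_to_target (target_ref : String) (parents : List (String × List String)) (roots : List String) (label_map : List (String × String)) (max_depth : Int) (max_paths : Int) (out : List String × Bool) : Prop := out = find_all_paths_to_target_alt target_ref parents roots label_map max_depth max_paths
instance (target_ref : String) (parents : List (String × List String)) (roots : List String) (label_map : List (String × String)) (max_depth : Int) (max_paths : Int) (out : List String × Bool) : Decidable (Spec_find_all_paths_to_target target_ref parents roots label_map max_depth max_paths out) := by unfold Spec_find_all_paths_to_target; infer_instance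

-- ===== CLAIM (what is proved, stated in full; the proofs are below) =====
def Claim_equal_find_all_paths_to_target : Prop := ∀ (target_ref : String) (parents : List (String × List String)) (roots : List String) (label_map : List (String × String)) (max_depth : Int) (max_paths : Int), Dom_find_all_paths_to_target target_ref parents roots label_map max_depth max_paths → Spec_find_all_paths_to_target target_ref parents roots label_map max_depth max_paths (find_all_paths_to_target target_ref parents roots label_map max_depth max_paths)

-- ===== LEMMAS AND PROOFS =====

-- proof-side: run pvDfsB over a list of stack entries, threading the fuel
def pvFD (parents : List (String × List String)) (rootsSet : PySem.Set String)
    (max_depth max_paths : Int) :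
    Nat → List (String × List String × PySem.Set String) → (List (List String) × Bool) →
    ((List (List String) × Bool) × Nat)
  | _, [], st => (st, 0)
  | fuel, (n, pr, sn) :: rest, st =>
    let q := pvDfsB parents rootsSet max_depth max_paths fuel n pr sn st
    let q' := pvFD parents rootsSet max_depth max_paths (fuel - q.2) rest q.1
    (q'.1, q.2 + q'.2)

-- proof-side: the entries A pushes for the parents list l (before the stack-order reversal)
def pvEntries (sn : PySem.Set String) (pr : List String) (l : List String) :
    List (String × List String × PySem.Set String) :=
  l.filterMap (fun p => if PySem.Set.contains sn p then none
                        else some (p, pr ++ [p], PySem.Set.add sn p))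

theorem pvDfsB_true (parents : List (String × List String)) (rootsSet : PySem.Set String)
    (md mp : Int) (fuel : Nat) (n : String) (pr : List String) (sn : PySem.Set String)
    (res : List (List String)) :
    pvDfsB parents rootsSet md mp fuel n pr sn (res, true) = ((res, true), 0) := by
  cases fuel <;> simp [pvDfsB]

theorem pvFD_true (parents : List (String × List String)) (rootsSet : PySem.Set String)
    (md mp : Int) (stack : List (String × List String × PySem.Set String))
    (fuel : Nat) (res : List (List String)) :
    pvFD parents rootsSet md mp fuel stack (res, true) = ((res, true), 0) := by
  induction stack generalizing fuel with
  | nil => simp [pvFD]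
  | cons e rest ih => obtain ⟨n, pr, sn⟩ := e; simp [pvFD, pvDfsB_true, ih]

theorem pvFD_zero (parents : List (String × List String)) (rootsSet : PySem.Set String)
    (md mp : Int) (stack : List (String × List String × PySem.Set String))
    (res : List (List String)) :
    (pvFD parents rootsSet md mp 0 stack (res, false)).1 = (res, false) := by
  induction stack with
  | nil => simp [pvFD]
  | cons e rest ih => obtain ⟨n, pr, sn⟩ := e; simp [pvFD, pvDfsB, ih]

theorem pvFD_append (parents : List (String × List String)) (rootsSet : PySem.Set String)
    (md mp : Int) (l1 l2 : List (String × List String × PySem.Set String))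
    (fuel : Nat) (st : List (List String) × Bool) :
    pvFD parents rootsSet md mp fuel (l1 ++ l2) st =
      (let q := pvFD parents rootsSet md mp fuel l1 st
       let q' := pvFD parents rootsSet md mp (fuel - q.2) l2 q.1
       (q'.1, q.2 + q'.2)) := by
  induction l1 generalizing fuel st with
  | nil => simp [pvFD]
  | cons e rest ih =>
    obtain ⟨n, pr, sn⟩ := e
    simp only [List.cons_append, pvFD, ih]
    simp [Nat.sub_sub, Nat.add_assoc]

theorem pvFoldB_eq_pvFD (parents : List (String × List String)) (rootsSet : PySem.Set String)
    (md mp : Int) (f : Nat) (pr : List String) (sn : PySem.Set String) :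
    ∀ (l : List String) (st : List (List String) × Bool) (c : Nat),
    l.foldl (fun acc p =>
        if PySem.Set.contains sn p then acc
        else
          let q := pvDfsB parents rootsSet md mp (f - acc.2) p (pr ++ [p])
              (PySem.Set.add sn p) acc.1
          (q.1, acc.2 + q.2)) (st, c) =
      (let q := pvFD parents rootsSet md mp (f - c) (pvEntries sn pr l) st
       (q.1, c + q.2)) := by
  intro l
  induction l with
  | nil => intro st c; simp [pvEntries, pvFD]
  | cons p rest ih =>
    intro st c
    have ih' := ih
    simp only [pvEntries] at ih' ⊢
    simp only [PySem.Set.contains, List.contains_eq_mem, decide_eq_true_eq] at ih'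
    by_cases h : p ∈ sn
    · simp [h, ih']
    · simp [h, pvFD, ih', Nat.sub_sub, Nat.add_assoc]

theorem pvPushed_eq (sn : PySem.Set String) (pr : List String) (l : List String) :
    ∀ acc : List (String × List String × PySem.Set String),
    l.foldl (fun acc p => if PySem.Set.contains sn p then acc
                          else acc ++ [(p, pr ++ [p], PySem.Set.add sn p)]) acc =
      acc ++ pvEntries sn pr l := by
  induction l with
  | nil => intro acc; simp [pvEntries]
  | cons p rest ih =>
    intro acc
    by_cases h : p ∈ sn <;> simp [pvEntries, List.filterMap_cons, h, ih] at * <;>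
      simp [ih, pvEntries]

theorem pvEntries_reverse (sn : PySem.Set String) (pr : List String) (l : List String) :
    (pvEntries sn pr l).reverse = pvEntries sn pr l.reverse := by
  simp [pvEntries, List.filterMap_reverse]

-- main correspondence: running B's dfs over the stack entries is A's stack loop
theorem pvFD_eq_pvLoopA (parents : List (String × List String)) (rootsSet : PySem.Set String)
    (md mp : Int) :
    ∀ (fuel : Nat) (stack : List (String × List String × PySem.Set String))
      (res : List (List String)),
    (pvFD parents rootsSet md mp fuel stack (res, false)).1 =
      pvLoopA parents rootsSet md mp fuel stack res := by
  intro fuel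
  induction fuel with
  | zero =>
    intro stack res
    cases stack with
    | nil => simp [pvFD, pvLoopA]
    | cons e rest => obtain ⟨n, pr, sn⟩ := e; simp [pvLoopA, pvFD_zero]
  | succ f ih =>
    intro stack res
    cases stack with
    | nil => simp [pvFD, pvLoopA]
    | cons e rest =>
      obtain ⟨n, pr, sn⟩ := e
      by_cases hcap : (res.length : Int) ≥ mp
      · simp [pvFD, pvDfsB, pvLoopA, hcap, pvFD_true]
      · by_cases hdep : (pr.length : Int) > md
        · simp [pvFD, pvDfsB, pvLoopA, hcap, hdep, ih]
        · by_cases hrt : n ∈ rootsSet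
          · simp [pvFD, pvDfsB, pvLoopA, hcap, hdep, hrt, ih]
          · -- else branch: children processed in stack order
            rw [show pvLoopA parents rootsSet md mp (f+1) ((n, pr, sn) :: rest) res =
                pvLoopA parents rootsSet md mp f
                  (((PySem.Dict.getD (PySem.Dict.mk parents) n []).foldl
                    (fun acc p => if PySem.Set.contains sn p then acc
                        else acc ++ [(p, pr ++ [p], PySem.Set.add sn p)]) []).reverse ++ rest) res
                from by simp [pvLoopA, hcap, hdep, hrt]]
            rw [pvPushed_eq, List.nil_append, pvEntries_reverse, ← ih]
            rw [pvFD_append]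
            simp only [pvFD, pvDfsB, hcap, hdep]
            simp only [if_neg (by simp : ¬ (false = true))]
            rw [pvFoldB_eq_pvFD]
            have hrtb : PySem.Set.contains rootsSet n = false := by
              simpa [PySem.Set.contains] using hrt
            simp only [hrtb, Bool.false_eq_true, if_false]
            simp [Nat.succ_sub_succ]

-- A's dedup loop: out and seen_s are the same list throughout, and the loop is Set.ofList
theorem pvDedup_eq (g : List String → String) :
    ∀ (l : List (List String)) (a : List String),
    l.foldl (fun (acc : List String × PySem.Set String) p =>
        if PySem.Set.contains acc.2 (g p) then acc
        else (acc.1 ++ [g p], PySem.Set.add acc.2 (g p))) (a, a) =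
      ((l.map g).foldl PySem.Set.add a, (l.map g).foldl PySem.Set.add a) := by
  intro l
  induction l with
  | nil => intro a; simp
  | cons p rest ih =>
    intro a
    by_cases h : g p ∈ a <;>
      simp [PySem.Set.add, PySem.Set.contains, h] at * <;> simp [ih]

-- ===== VERDICT (by name: the statement is the Claim_ definition above) =====
theorem find_all_paths_to_target_spec : Claim_equal_find_all_paths_to_target := by
  intro target_ref parents roots label_map max_depth max_paths _
  unfold Spec_find_all_paths_to_target
  unfold find_all_paths_to_target find_all_paths_to_target_alt
  dsimp only
  have hq : (pvDfsB parents (PySem.Set.ofList roots) max_depth max_paths (pvFuelBound parents)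
      target_ref [target_ref] (PySem.Set.ofList [target_ref]) ([], false)).1 =
      pvLoopA parents (PySem.Set.ofList roots) max_depth max_paths (pvFuelBound parents)
        [(target_ref, [target_ref], PySem.Set.ofList [target_ref])] [] := by
    rw [← pvFD_eq_pvLoopA]
    simp [pvFD]
  rw [hq]
  have hd := pvDedup_eq
      (fun p => PySem.Str.join " -> " (p.map (fun x => PySem.Dict.getD (PySem.Dict.mk label_map) x x)))
      (pvLoopA parents (PySem.Set.ofList roots) max_depth max_paths (pvFuelBound parents)
        [(target_ref, [target_ref], PySem.Set.ofList [target_ref])] []).1 []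
  simp only at hd
  simp only [PySem.Set.empty]
  rw [hd]
  simp [PySem.List.dedup_eq_ofList, PySem.Set.ofList_eq_foldl, List.foldl_map]
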